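-- pv_equiv track=rewrite | github.com/codechockablock/profit-sentinel-saas | packages/sentinel-engine/src/sentinel_engine/contradiction_detector.py | resolve_contradictions
-- ===== SOURCE A (Python) =====
-- from typing import Dict, Set, List, Tuple
--
-- CONTRADICTORY_PAIRS = [
--     ("low_stock", "overstock", "Cannot have both low stock and overstock"),
--     ("dead_item", "high_velocity", "Cannot be dead and high velocity"),
--     ("negative_inventory", "overstock", "Cannot have negative inventory and overstock"),
--     ("negative_inventory", "low_stock", "Negative inventory is more severe than low stock"),
-- ]
--
-- def resolve_contradictions(
--     detections: Dict[str, Set[str]],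
--     priority_order: List[str] = None
-- ) -> Dict[str, Set[str]]:
--     """
--     Resolve contradictions by keeping higher-priority primitive.
--
--     Default priority (highest to lowest):
--     1. negative_inventory (data integrity)
--     2. high_margin_leak (profitability)
--     3. low_stock (lost sales)
--     4. dead_item (tied capital)
--     5. overstock (cash flow)
--     6. Other primitives
--
--     Args:
--         detections: Dict mapping primitive name to set of detected SKUs
--         priority_order: Custom priority list (highest first)
--
--     Returns:
--         Resolved detections with contradictions removed
--     """
--     if priority_order is None:
--         priority_order = [
--             "negative_inventory",
--             "high_margin_leak",
--             "shrinkage_pattern",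
--             "low_stock",
--             "margin_erosion",
--             "dead_item",
--             "price_discrepancy",
--             "overstock",
--         ]
--
--     # Create priority map
--     priority = {p: i for i, p in enumerate(priority_order)}
--
--     # Work on copy
--     resolved = {p: skus.copy() for p, skus in detections.items()}
--
--     for prim_a, prim_b, reason in CONTRADICTORY_PAIRS:
--         skus_a = resolved.get(prim_a, set())
--         skus_b = resolved.get(prim_b, set())
--
--         overlapping = skus_a & skus_b
--
--         if overlapping:
--             # Determine which primitive has higher priority
--             prio_a = priority.get(prim_a, 999)
--             prio_b = priority.get(prim_b, 999)
--
--             if prio_a <= prio_b: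
--                 # Keep prim_a, remove from prim_b
--                 resolved[prim_b] = skus_b - overlapping
--             else:
--                 # Keep prim_b, remove from prim_a
--                 resolved[prim_a] = skus_a - overlapping
--
--     return resolved
-- ===== SOURCE B (Python) =====
-- CONTRADICTORY_PAIRS = [
--     ("low_stock", "overstock", "Cannot have both low stock and overstock"),
--     ("dead_item", "high_velocity", "Cannot be dead and high velocity"),
--     ("negative_inventory", "overstock", "Cannot have negative inventory and overstock"),
--     ("negative_inventory", "low_stock", "Negative inventory is more severe than low stock"),
-- ]
--
-- def resolve_contradictions(detections, priority_order=None):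
--     """Per-SKU resolution: invert the detections into a SKU -> primitives map,
--     simulate the contradiction pairs once per SKU collecting (primitive, sku)
--     removals, then rebuild each detection set keeping the survivors."""
--     if priority_order is None:
--         priority_order = [
--             "negative_inventory",
--             "high_margin_leak",
--             "shrinkage_pattern",
--             "low_stock",
--             "margin_erosion",
--             "dead_item",
--             "price_discrepancy",
--             "overstock",
--         ]
--     priority = {p: i for i, p in enumerate(priority_order)}
--     det = dict(detections)
--
--     by_sku = {}
--     for p, skus in det.items():
--         for s in skus:
--             by_sku.setdefault(s, set()).add(p)
--
--     removed = set()
--     for s, present in by_sku.items():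
--         for a, b, _reason in CONTRADICTORY_PAIRS:
--             if a in present and b in present:
--                 loser = b if priority.get(a, 999) <= priority.get(b, 999) else a
--                 present.discard(loser)
--                 removed.add((loser, s))
--
--     return {p: {s for s in skus if (p, s) not in removed} for p, skus in det.items()}
-- ===== Notes on version B (the rewrite author's own statement) =====
-- stated objective: alternative
-- what changed: Instead of A's per-pair global set algebra (intersect/difference and dict overwrites over four passes), B inverts the detections into a SKU -> primitives map in one pass, simulates the contradiction pairs once per SKU collecting (primitive, sku) removals, and rebuilds each detection set keeping the survivors.
import Mathlib
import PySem

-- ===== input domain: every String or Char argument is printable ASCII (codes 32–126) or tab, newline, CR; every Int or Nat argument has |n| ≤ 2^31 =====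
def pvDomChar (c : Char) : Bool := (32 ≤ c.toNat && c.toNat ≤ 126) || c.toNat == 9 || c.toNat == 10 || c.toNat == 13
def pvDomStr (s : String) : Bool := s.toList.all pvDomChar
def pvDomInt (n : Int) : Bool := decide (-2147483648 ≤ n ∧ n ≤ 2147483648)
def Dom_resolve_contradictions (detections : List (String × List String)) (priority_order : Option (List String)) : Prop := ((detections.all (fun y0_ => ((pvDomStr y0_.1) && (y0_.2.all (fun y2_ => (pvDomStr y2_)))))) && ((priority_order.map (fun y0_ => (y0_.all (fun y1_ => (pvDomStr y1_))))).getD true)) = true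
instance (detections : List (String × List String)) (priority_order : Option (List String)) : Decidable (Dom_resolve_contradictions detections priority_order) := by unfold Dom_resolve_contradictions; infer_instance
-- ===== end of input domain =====

-- B replaces A's per-pair global set algebra by a per-SKU simulation of the contradiction
-- pairs (objective: alternative decomposition, same observable result; return value only —
-- neither program mutates its arguments).

-- module constant CONTRADICTORY_PAIRS (shared by both Pythons)
def pvPairs : List (String × String × String) :=
  [("low_stock", "overstock", "Cannot have both low stock and overstock"),
   ("dead_item", "high_velocity", "Cannot be dead and high velocity"),
   ("negative_inventory", "overstock", "Cannot have negative inventory and overstock"),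
   ("negative_inventory", "low_stock", "Negative inventory is more severe than low stock")]

-- the default priority list (identical literal in both Pythons)
def pvDefaultPriority : List String :=
  ["negative_inventory", "high_margin_leak", "shrinkage_pattern", "low_stock",
   "margin_erosion", "dead_item", "price_discrepancy", "overstock"]

-- priority = {p: i for i, p in enumerate(priority_order)}  (identical line in both Pythons)
def pvPriorityMap (po : List String) : PySem.Dict String Int :=
  (PySem.List.enumerate po).foldl (fun d ip => d.insert ip.2 ip.1) PySem.Dict.empty

-- A: resolved = {p: skus.copy() for p, skus in detections.items()};  B: det = dict(detections)
-- (set.copy() is the identity on the immutable Lean side)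
def pvDictOf (l : List (String × List String)) : PySem.Dict String (List String) :=
  l.foldl (fun d pv => d.insert pv.1 pv.2) PySem.Dict.empty

-- ===== PORT A =====
-- body of A's 'for prim_a, prim_b, reason in CONTRADICTORY_PAIRS' loop
def pvResolveStep (priority : PySem.Dict String Int) (r : PySem.Dict String (List String))
    (pr : String × String × String) : PySem.Dict String (List String) :=
  let skus_a := r.getD pr.1 []
  let skus_b := r.getD pr.2.1 []
  let overlapping := PySem.Set.inter skus_a skus_b
  if overlapping ≠ [] then      -- 'if overlapping:'
    let prio_a := priority.getD pr.1 999
    let prio_b := priority.getD pr.2.1 999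
    if prio_a ≤ prio_b then r.insert pr.2.1 (PySem.Set.diff skus_b overlapping)
    else r.insert pr.1 (PySem.Set.diff skus_a overlapping)
  else r

def resolve_contradictions (detections : List (String × List String)) (priority_order : Option (List String)) : List (String × List String) :=
  let po := priority_order.getD pvDefaultPriority
  let priority := pvPriorityMap po
  let resolved := pvDictOf detections
  (pvPairs.foldl (pvResolveStep priority) resolved).items

-- ===== PORT B =====
-- by_sku = {}; for p, skus in det.items(): for s in skus: by_sku.setdefault(s, set()).add(p)
def pvBySku (det : PySem.Dict String (List String)) : PySem.Dict String (PySem.Set String) :=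
  det.items.foldl (fun m pv => pv.2.foldl (fun m s => m.modify s [] (fun st => st.add pv.1)) m) PySem.Dict.empty

-- body of B's per-SKU 'for a, b, _reason in CONTRADICTORY_PAIRS' loop, carrying (present, removed)
def pvPairStep (priority : PySem.Dict String Int) (sku : String)
    (st : PySem.Set String × PySem.Set (String × String)) (pr : String × String × String) :
    PySem.Set String × PySem.Set (String × String) :=
  if st.1.contains pr.1 && st.1.contains pr.2.1 then
    let loser := if priority.getD pr.1 999 ≤ priority.getD pr.2.1 999 then pr.2.1 else pr.1
    (st.1.discard loser, st.2.add (loser, sku))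
  else st

-- removed = set(); for s, present in by_sku.items(): <pair loop>
def pvRemoved (priority : PySem.Dict String Int) (det : PySem.Dict String (List String)) :
    PySem.Set (String × String) :=
  (pvBySku det).items.foldl
    (fun rem sp => (pvPairs.foldl (pvPairStep priority sp.1) (sp.2, rem)).2) PySem.Set.empty

def resolve_contradictions_alt (detections : List (String × List String)) (priority_order : Option (List String)) : List (String × List String) :=
  let po := priority_order.getD pvDefaultPriority
  let priority := pvPriorityMap po
  let det := pvDictOf detections
  let removed := pvRemoved priority det
  (det.items.foldl (fun r pv => r.insert pv.1 (pv.2.filter (fun s => !removed.contains (pv.1, s)))) PySem.Dict.empty).items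

-- ===== PRECONDITION & SPEC =====
def Spec_resolve_contradictions (detections : List (String × List String)) (priority_order : Option (List String)) (out : List (String × List String)) : Prop := out = resolve_contradictions_alt detections priority_order
instance (detections : List (String × List String)) (priority_order : Option (List String)) (out : List (String × List String)) : Decidable (Spec_resolve_contradictions detections priority_order out) := by unfold Spec_resolve_contradictions; infer_instance

-- ===== CLAIM (what is proved, stated in full; the proofs are below) =====
def Claim_equal_resolve_contradictions : Prop := ∀ (detections : List (String × List String)) (priority_order : Option (List String)), Dom_resolve_contradictions detections priority_order → Spec_resolve_contradictions detections priority_order (resolve_contradictions detections priority_order)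

-- ===== LEMMAS AND PROOFS =====

-- per-SKU abstract simulation of one pair / of the pair list, on a membership predicate
def pvSimStep (priority : PySem.Dict String Int) (pr : String × String × String)
    (f : String → Bool) : String → Bool :=
  fun p => f p && !(f pr.1 && f pr.2.1 &&
    (p == (if priority.getD pr.1 999 ≤ priority.getD pr.2.1 999 then pr.2.1 else pr.1)))

def pvSim (priority : PySem.Dict String Int) (pairs : List (String × String × String))
    (f : String → Bool) : String → Bool :=
  pairs.foldl (fun f pr => pvSimStep priority pr f) f

lemma pvBeqString (a b : String) : (a == b) = decide (a = b) := by
  by_cases h : a = b <;> simp [h]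

-- the simulation only ever removes primitives
lemma pvSim_mono (priority : PySem.Dict String Int) (pairs : List (String × String × String))
    (f : String → Bool) (p : String) (h : pvSim priority pairs f p = true) : f p = true := by
  induction pairs generalizing f with
  | nil => exact h
  | cons pr rest ih =>
    have h2 := ih (pvSimStep priority pr f) h
    simp [pvSimStep] at h2
    exact h2.1

-- one A-step never adds or drops a key
lemma pvStep_keys (priority : PySem.Dict String Int) (r : PySem.Dict String (List String))
    (pr : String × String × String) : (pvResolveStep priority r pr).keys = r.keys := by
  unfold pvResolveStep
  by_cases hov : PySem.Set.inter (r.getD pr.1 []) (r.getD pr.2.1 []) ≠ []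
  · obtain ⟨s, hs⟩ := List.exists_mem_of_ne_nil _ hov
    have hsab := (PySem.Set.mem_inter _ _ s).mp hs
    have hca : r.contains pr.1 = true := by
      by_contra hx
      have := PySem.Dict.getD_of_not_contains r ([] : List String) (by simpa using hx)
      rw [this] at hsab
      exact absurd hsab.1 (List.not_mem_nil)
    have hcb : r.contains pr.2.1 = true := by
      by_contra hx
      have := PySem.Dict.getD_of_not_contains r ([] : List String) (by simpa using hx)
      rw [this] at hsab
      exact absurd hsab.2 (List.not_mem_nil)
    simp only [if_pos hov]
    by_cases hle : priority.getD pr.1 999 ≤ priority.getD pr.2.1 999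
    · rw [if_pos hle, PySem.Dict.keys_insert_of_contains r _ hcb]
    · rw [if_neg hle, PySem.Dict.keys_insert_of_contains r _ hca]
  · simp only [if_neg hov]

-- one A-step filters every stored set exactly as the per-SKU simulation of that pair does
lemma pvStep_getD (priority : PySem.Dict String Int) (r : PySem.Dict String (List String))
    (pr : String × String × String) (p : String) :
    (pvResolveStep priority r pr).getD p [] =
      (r.getD p []).filter (fun s => pvSimStep priority pr (fun q => decide (s ∈ r.getD q [])) p) := by
  unfold pvResolveStep pvSimStep
  by_cases hov : PySem.Set.inter (r.getD pr.1 []) (r.getD pr.2.1 []) ≠ []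
  · simp only [if_pos hov]
    by_cases hle : priority.getD pr.1 999 ≤ priority.getD pr.2.1 999
    · rw [if_pos hle]
      rw [PySem.Dict.getD_insert]
      by_cases hp : p = pr.2.1
      · rw [if_pos hp, hp]
        unfold PySem.Set.diff
        apply List.filter_congr
        intro s hs
        have hsb : decide (s ∈ r.getD pr.2.1 []) = true := by simp [hs]
        simp only [if_pos hle, hsb, PySem.Set.contains, List.contains_eq_mem,
          PySem.Set.inter, List.mem_filter]
        by_cases hsa : s ∈ r.getD pr.1 []
        · simp [hsa]
        · simp [hsa]
      · rw [if_neg hp]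
        symm
        rw [List.filter_eq_self]
        intro s hs
        have hsp : decide (s ∈ r.getD p []) = true := by simp [hs]
        simp only [if_pos hle, hsp]
        simp [hp]
    · rw [if_neg hle]
      rw [PySem.Dict.getD_insert]
      by_cases hp : p = pr.1
      · rw [if_pos hp, hp]
        unfold PySem.Set.diff
        apply List.filter_congr
        intro s hs
        have hsa : decide (s ∈ r.getD pr.1 []) = true := by simp [hs]
        simp only [if_neg hle, hsa, PySem.Set.contains, List.contains_eq_mem,
          PySem.Set.inter, List.mem_filter]
        by_cases hsb : s ∈ r.getD pr.2.1 []
        · simp [hsb, hs]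
        · simp [hsb]
      · rw [if_neg hp]
        symm
        rw [List.filter_eq_self]
        intro s hs
        have hsp : decide (s ∈ r.getD p []) = true := by simp [hs]
        simp only [if_neg hle, hsp]
        simp [hp]
  · simp only [if_neg hov]
    symm
    rw [List.filter_eq_self]
    intro s hs
    rw [not_ne_iff] at hov
    have hno : ¬ (s ∈ r.getD pr.1 [] ∧ s ∈ r.getD pr.2.1 []) := by
      intro hmem
      have : s ∈ PySem.Set.inter (r.getD pr.1 []) (r.getD pr.2.1 []) :=
        (PySem.Set.mem_inter _ _ s).mpr hmem
      rw [hov] at this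
      exact absurd this (List.not_mem_nil)
    have hsp : decide (s ∈ r.getD p []) = true := by simp [hs]
    simp only [hsp]
    by_cases h1 : s ∈ r.getD pr.1 []
    · have h2 : ¬ s ∈ r.getD pr.2.1 [] := fun h2 => hno ⟨h1, h2⟩
      simp [h1, h2]
    · simp [h1]

lemma pvFoldA_keys (priority : PySem.Dict String Int) (pairs : List (String × String × String))
    (r : PySem.Dict String (List String)) :
    (pairs.foldl (pvResolveStep priority) r).keys = r.keys := by
  induction pairs generalizing r with
  | nil => rfl
  | cons pr rest ih => rw [List.foldl_cons, ih, pvStep_keys]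

-- A's whole pair loop computes, at every key, the filter by the per-SKU simulation
lemma pvFoldA_getD (priority : PySem.Dict String Int) (pairs : List (String × String × String))
    (r : PySem.Dict String (List String)) (p : String) :
    (pairs.foldl (pvResolveStep priority) r).getD p [] =
      (r.getD p []).filter (fun s => pvSim priority pairs (fun q => decide (s ∈ r.getD q [])) p) := by
  induction pairs generalizing r with
  | nil =>
    rw [List.foldl_nil]
    symm
    rw [List.filter_eq_self]
    intro s hs
    simpa [pvSim] using hs
  | cons pr rest ih =>
    rw [List.foldl_cons, ih]
    have hfun : ∀ s : String, (fun q => decide (s ∈ (pvResolveStep priority r pr).getD q [])) =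
        pvSimStep priority pr (fun q => decide (s ∈ r.getD q [])) := by
      intro s
      funext q
      rw [pvStep_getD]
      by_cases hm : s ∈ r.getD q []
      · simp only [List.mem_filter, hm]
        simp [pvSimStep, pvBeqString]
      · have : ¬ s ∈ (r.getD q []).filter
            (fun s' => pvSimStep priority pr (fun q' => decide (s' ∈ r.getD q' [])) q) := by
          intro hx
          exact hm (List.mem_of_mem_filter hx)
        simp only [this]
        simp [pvSimStep, pvBeqString, hm]
    rw [pvStep_getD]
    rw [List.filter_filter]
    apply List.filter_congr
    intro s _
    rw [hfun s]
    show (pvSim priority rest (pvSimStep priority pr fun q => decide (s ∈ r.getD q [])) p &&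
        pvSimStep priority pr (fun q => decide (s ∈ r.getD q [])) p) =
      pvSim priority (pr :: rest) (fun q => decide (s ∈ r.getD q [])) p
    have hcons : pvSim priority (pr :: rest) (fun q => decide (s ∈ r.getD q [])) p =
        pvSim priority rest (pvSimStep priority pr fun q => decide (s ∈ r.getD q [])) p := rfl
    rw [hcons]
    cases hX : pvSim priority rest (pvSimStep priority pr fun q => decide (s ∈ r.getD q [])) p with
    | false => simp
    | true =>
      have := pvSim_mono priority rest _ p hX
      simp [this]

lemma pvModifyAdd_getD (p : String) (skus : List String) (m : PySem.Dict String (PySem.Set String))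
    (s : String) :
    (skus.foldl (fun m s => m.modify s [] (fun st => st.add p)) m).getD s [] =
      if s ∈ skus then (m.getD s []).add p else m.getD s [] := by
  induction skus generalizing m with
  | nil => simp
  | cons x rest ih =>
    rw [List.foldl_cons, ih, PySem.Dict.getD_modify]
    by_cases hsx : s = x <;> by_cases hsr : s ∈ rest
    · simp [hsx]
    · simp [hsx]
    · simp [hsx, hsr]
    · simp [hsx, hsr]

-- the inversion maps each SKU to exactly the primitives whose row contains it

lemma pvMem_bySku_fold (l : List (String × List String)) (m : PySem.Dict String (PySem.Set String))
    (s q : String) :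
    (q ∈ (l.foldl (fun m pv => pv.2.foldl (fun m s => m.modify s [] (fun st => st.add pv.1)) m) m).getD s [])
      ↔ (q ∈ m.getD s [] ∨ ∃ pv ∈ l, s ∈ pv.2 ∧ q = pv.1) := by
  induction l generalizing m with
  | nil => simp
  | cons pv rest ih =>
    rw [List.foldl_cons, ih, pvModifyAdd_getD]
    by_cases hs : s ∈ pv.2
    · rw [if_pos hs, PySem.Set.mem_add]
      constructor
      · rintro (⟨h1 | h2⟩ | h3)
        · exact Or.inl h1
        · exact Or.inr ⟨pv, by simp, hs, h2⟩
        · obtain ⟨pw, hw, h⟩ := h3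
          exact Or.inr ⟨pw, by simp [hw], h⟩
      · rintro (h1 | ⟨pw, hw, h⟩)
        · exact Or.inl (Or.inl h1)
        · rcases List.mem_cons.mp hw with he | hm
          · exact Or.inl (Or.inr (he ▸ h.2))
          · exact Or.inr ⟨pw, hm, h⟩
    · rw [if_neg hs]
      constructor
      · rintro (h1 | ⟨pw, hw, h⟩)
        · exact Or.inl h1
        · exact Or.inr ⟨pw, List.mem_cons_of_mem _ hw, h⟩
      · rintro (h1 | ⟨pw, hw, h⟩)
        · exact Or.inl h1
        · rcases List.mem_cons.mp hw with he | hm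
          · exact absurd (he ▸ h.1) hs
          · exact Or.inr ⟨pw, hm, h⟩

lemma pvMem_bySku (det : PySem.Dict String (List String)) (s q : String) :
    (q ∈ (pvBySku det).getD s []) ↔ ∃ pv ∈ det.items, s ∈ pv.2 ∧ q = pv.1 := by
  unfold pvBySku
  rw [pvMem_bySku_fold]
  simp [PySem.Dict.getD_empty]

lemma pvDiscard_contains (pres : PySem.Set String) (l q' : String) :
    (pres.discard l).contains q' = (pres.contains q' && !(q' == l)) := by
  simp [PySem.Set.discard, PySem.Set.contains, List.contains_eq_mem, List.mem_filter]
  by_cases hq : q' = l <;> simp [hq]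

lemma pvBySku_contains (det : PySem.Dict String (List String)) (hk : det.keys.Nodup)
    (s q : String) :
    ((pvBySku det).getD s []).contains q = decide (s ∈ det.getD q []) := by
  have hiff : (q ∈ (pvBySku det).getD s []) ↔ s ∈ det.getD q [] := by
    rw [pvMem_bySku]
    constructor
    · rintro ⟨pv, hm, hs, hq⟩
      have : det.getD pv.1 [] = pv.2 := PySem.Dict.getD_of_mem_items det (by simpa using hm) hk []
      rw [hq, this]; exact hs
    · intro h
      cases hget : det.get? q with
      | none =>
        rw [PySem.Dict.getD_eq_get?_getD, hget] at h
        simp at h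
      | some v =>
        have hm := PySem.Dict.mem_items_of_get?_eq_some det hget
        have : det.getD q [] = v := by rw [PySem.Dict.getD_eq_get?_getD, hget]; rfl
        exact ⟨(q, v), hm, this ▸ h, rfl⟩
  by_cases h : q ∈ (pvBySku det).getD s []
  · rw [(PySem.Set.contains_iff _ q).mpr h]
    simp [hiff.mp h]
  · have hc : ((pvBySku det).getD s []).contains q = false := by
      by_contra hx
      exact h ((PySem.Set.contains_iff _ q).mp (by simpa using hx))
    rw [hc]
    simp [hiff.not.mp h]

lemma pvBySku_fold_nodup (l : List (String × List String)) (m : PySem.Dict String (PySem.Set String))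
    (hm : m.keys.Nodup) :
    (l.foldl (fun m pv => pv.2.foldl (fun m s => m.modify s [] (fun st => st.add pv.1)) m) m).keys.Nodup := by
  induction l generalizing m with
  | nil => exact hm
  | cons pv rest ih =>
    rw [List.foldl_cons]
    exact ih _ (PySem.Dict.nodup_keys_foldl_modify_key pv.2 (fun s => s) [] (fun _ _ (st : PySem.Set String) => st.add pv.1) m hm)

lemma pvBySku_nodup (det : PySem.Dict String (List String)) : (pvBySku det).keys.Nodup := by
  unfold pvBySku
  exact pvBySku_fold_nodup det.items PySem.Dict.empty PySem.Dict.nodup_keys_empty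

lemma pvFold2 (priority : PySem.Dict String Int) (pairs : List (String × String × String))
    (sku : String) (pres : PySem.Set String) (rem : PySem.Set (String × String))
    (f : String → Bool) (h : ∀ q, pres.contains q = f q) :
    (∀ q, (pairs.foldl (pvPairStep priority sku) (pres, rem)).1.contains q = pvSim priority pairs f q)
    ∧ (∀ x : String × String, x ∈ (pairs.foldl (pvPairStep priority sku) (pres, rem)).2 ↔
        (x ∈ rem ∨ (x.2 = sku ∧ f x.1 = true ∧ pvSim priority pairs f x.1 = false))) := by
  induction pairs generalizing pres rem f with
  | nil =>
    refine ⟨fun q => h q, fun x => ?_⟩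
    unfold pvSim
    simp only [List.foldl_nil]
    constructor
    · exact fun hx => Or.inl hx
    · rintro (hx | ⟨_, h1, h2⟩)
      · exact hx
      · rw [h1] at h2; cases h2
  | cons pr rest ih =>
    rw [List.foldl_cons]
    have hsimcons : ∀ p, pvSim priority (pr :: rest) f p =
        pvSim priority rest (pvSimStep priority pr f) p := fun _ => rfl
    cases hc : (pres.contains pr.1 && pres.contains pr.2.1) with
    | false =>
      have hstep : pvPairStep priority sku (pres, rem) pr = (pres, rem) := by
        unfold pvPairStep
        rw [show ((pres, rem).1.contains pr.1 && (pres, rem).1.contains pr.2.1) = false from hc]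
        simp
      rw [hstep]
      have hf' : ∀ q, pres.contains q = pvSimStep priority pr f q := by
        intro q
        unfold pvSimStep
        rw [h q, ← h pr.1, ← h pr.2.1, hc]
        simp
      obtain ⟨ih1, ih2⟩ := ih pres rem (pvSimStep priority pr f) hf'
      refine ⟨fun q => by rw [ih1 q, hsimcons], fun x => ?_⟩
      rw [ih2 x, hsimcons]
      have hfx : pvSimStep priority pr f x.1 = f x.1 := by
        unfold pvSimStep
        rw [← h pr.1, ← h pr.2.1, hc]
        simp
      rw [hfx]
    | true =>
      have hstep : pvPairStep priority sku (pres, rem) pr =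
          (pres.discard (if priority.getD pr.1 999 ≤ priority.getD pr.2.1 999 then pr.2.1 else pr.1),
           rem.add ((if priority.getD pr.1 999 ≤ priority.getD pr.2.1 999 then pr.2.1 else pr.1), sku)) := by
        unfold pvPairStep
        rw [show ((pres, rem).1.contains pr.1 && (pres, rem).1.contains pr.2.1) = true from hc]
        simp
      rw [hstep]
      rw [Bool.and_eq_true] at hc
      set loser := (if priority.getD pr.1 999 ≤ priority.getD pr.2.1 999 then pr.2.1 else pr.1) with hloser
      have hf' : ∀ q, (pres.discard loser).contains q = pvSimStep priority pr f q := by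
        intro q
        rw [pvDiscard_contains]
        unfold pvSimStep
        rw [h q, ← h pr.1, ← h pr.2.1, hc.1, hc.2, ← hloser]
        simp
      obtain ⟨ih1, ih2⟩ := ih (pres.discard loser) (rem.add (loser, sku)) (pvSimStep priority pr f) hf'
      refine ⟨fun q => by rw [ih1 q, hsimcons], fun x => ?_⟩
      rw [ih2 x, hsimcons, PySem.Set.mem_add]
      have hfloser : f loser = true := by
        rw [hloser]
        split
        · exact h pr.2.1 ▸ hc.2
        · exact h pr.1 ▸ hc.1
      have hstep_loser : pvSimStep priority pr f loser = false := by
        unfold pvSimStep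
        rw [← h pr.1, ← h pr.2.1, hc.1, hc.2, ← hloser, hfloser]
        simp
      constructor
      · rintro ((hx | hx) | ⟨h1, h2, h3⟩)
        · exact Or.inl hx
        · refine Or.inr ⟨by rw [hx], by rw [hx]; exact hfloser, ?_⟩
          rw [hx]
          cases hX : pvSim priority rest (pvSimStep priority pr f) (loser, sku).1
          · rfl
          · have := pvSim_mono priority rest _ (loser, sku).1 hX
            simp only at this
            rw [hstep_loser] at this
            cases this
        · refine Or.inr ⟨h1, ?_, h3⟩
          unfold pvSimStep at h2
          rw [Bool.and_eq_true] at h2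
          exact h2.1
      · rintro (hx | ⟨h1, h2, h3⟩)
        · exact Or.inl (Or.inl hx)
        · by_cases hxl : x.1 = loser
          · refine Or.inl (Or.inr ?_)
            have : x = (x.1, x.2) := rfl
            rw [this, hxl, h1]
          · refine Or.inr ⟨h1, ?_, h3⟩
            unfold pvSimStep
            rw [← h pr.1, ← h pr.2.1, hc.1, hc.2, h2, ← hloser]
            simp [hxl]

lemma pvRemoved_fold_mem (priority : PySem.Dict String Int)
    (l : List (String × PySem.Set String)) (rem : PySem.Set (String × String))
    (x : String × String) :
    x ∈ l.foldl (fun rem sp => (pvPairs.foldl (pvPairStep priority sp.1) (sp.2, rem)).2) rem ↔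
      (x ∈ rem ∨ ∃ sp ∈ l, x.2 = sp.1 ∧ sp.2.contains x.1 = true ∧
        pvSim priority pvPairs (fun q => sp.2.contains q) x.1 = false) := by
  induction l generalizing rem with
  | nil => simp
  | cons sp rest ih =>
    rw [List.foldl_cons, ih]
    have h2 := (pvFold2 priority pvPairs sp.1 sp.2 rem (fun q => sp.2.contains q)
      (fun _ => rfl)).2 x
    rw [h2]
    constructor
    · rintro ((hx | ⟨h1, h2', h3⟩) | ⟨sq, hq, h⟩)
      · exact Or.inl hx
      · exact Or.inr ⟨sp, by simp, h1, h2', h3⟩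
      · exact Or.inr ⟨sq, by simp [hq], h⟩
    · rintro (hx | ⟨sq, hq, h⟩)
      · exact Or.inl (Or.inl hx)
      · rcases List.mem_cons.mp hq with he | hm
        · exact Or.inl (Or.inr (by rw [he] at h; exact h))
        · exact Or.inr ⟨sq, hm, h⟩

-- the survivor test of B equals the per-SKU simulation, for SKUs actually detected at k

lemma pvKeep_eq (priority : PySem.Dict String Int) (det : PySem.Dict String (List String))
    (hk : det.keys.Nodup) (k s : String) (hs : s ∈ det.getD k []) :
    (!(pvRemoved priority det).contains (k, s)) =
      pvSim priority pvPairs (fun q => decide (s ∈ det.getD q [])) k := by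
  have hfun : (fun q => ((pvBySku det).getD s []).contains q) =
      (fun q => decide (s ∈ det.getD q [])) := funext (fun q => pvBySku_contains det hk s q)
  have hmem : (k, s) ∈ pvRemoved priority det ↔
      (∃ sp ∈ (pvBySku det).items, s = sp.1 ∧ sp.2.contains k = true ∧
        pvSim priority pvPairs (fun q => sp.2.contains q) k = false) := by
    unfold pvRemoved
    rw [pvRemoved_fold_mem]
    simp [PySem.Set.empty]
  have hkeysmem : s ∈ (pvBySku det).keys := by
    have hkb : k ∈ (pvBySku det).getD s [] := by
      rw [pvMem_bySku]
      cases hget : det.get? k with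
      | none =>
        rw [PySem.Dict.getD_eq_get?_getD, hget] at hs
        simp at hs
      | some v =>
        have hm := PySem.Dict.mem_items_of_get?_eq_some det hget
        have : det.getD k [] = v := by rw [PySem.Dict.getD_eq_get?_getD, hget]; rfl
        exact ⟨(k, v), hm, this ▸ hs, rfl⟩
    by_contra hnk
    have : (pvBySku det).contains s = false := by
      cases hcs : (pvBySku det).contains s
      · rfl
      · exact absurd ((PySem.Dict.contains_iff_mem_keys _ s).mp hcs) hnk
    rw [PySem.Dict.getD_of_not_contains _ _ this] at hkb
    exact absurd hkb (List.not_mem_nil)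
  have hsp : ∀ sp ∈ (pvBySku det).items, s = sp.1 → sp.2 = (pvBySku det).getD s [] := by
    intro sp hm he
    have : (pvBySku det).getD sp.1 [] = sp.2 :=
      PySem.Dict.getD_of_mem_items _ (by simpa using hm) (pvBySku_nodup det) []
    rw [← he] at this
    exact this.symm
  by_cases hin : (k, s) ∈ pvRemoved priority det
  · rw [(PySem.Set.contains_iff _ _).mpr hin]
    obtain ⟨sp, hm, he, _, h4⟩ := hmem.mp hin
    rw [hsp sp hm he, hfun] at h4
    rw [h4]
    rfl
  · have hcf : (pvRemoved priority det).contains (k, s) = false := by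
      cases hcs : (pvRemoved priority det).contains (k, s)
      · rfl
      · exact absurd ((PySem.Set.contains_iff _ _).mp hcs) hin
    rw [hcf]
    cases hX : pvSim priority pvPairs (fun q => decide (s ∈ det.getD q [])) k with
    | true => rfl
    | false =>
      exfalso
      apply hin
      apply hmem.mpr
      obtain ⟨pres, hget⟩ : ∃ pres, (pvBySku det).get? s = some pres := by
        have := PySem.Dict.contains_eq_isSome_get? (pvBySku det) s
        rw [(PySem.Dict.contains_iff_mem_keys _ s).mpr hkeysmem] at this
        cases hg : (pvBySku det).get? s with
        | none => rw [hg] at this; cases this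
        | some v => exact ⟨v, rfl⟩
      have hitems := PySem.Dict.mem_items_of_get?_eq_some _ hget
      have hgd : (pvBySku det).getD s [] = pres := by
        rw [PySem.Dict.getD_eq_get?_getD, hget]; rfl
      refine ⟨(s, pres), hitems, rfl, ?_, ?_⟩
      · show pres.contains k = true
        rw [← hgd, pvBySku_contains det hk s k]
        simp [hs]
      · show pvSim priority pvPairs (fun q => pres.contains q) k = false
        rw [← hgd, hfun]
        exact hX

-- ===== VERDICT (by name: the statement is the Claim_ definition above) =====
theorem resolve_contradictions_spec : Claim_equal_resolve_contradictions := by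
  intro detections priority_order _
  unfold Spec_resolve_contradictions resolve_contradictions resolve_contradictions_alt
  set priority := pvPriorityMap (priority_order.getD pvDefaultPriority) with hprio
  set d0 := pvDictOf detections with hd0
  have hk : d0.keys.Nodup := by
    rw [hd0]
    unfold pvDictOf
    exact PySem.Dict.nodup_keys_foldl_insert_key detections Prod.fst (fun d pv => pv.2)
      PySem.Dict.empty (by simp)
  -- A side
  have hkeys := pvFoldA_keys priority pvPairs d0
  have hnd' : (pvPairs.foldl (pvResolveStep priority) d0).keys.Nodup := by rw [hkeys]; exact hk
  rw [PySem.Dict.items_eq_map_keys _ hnd' [], hkeys]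
  -- B side
  rw [PySem.Dict.items_foldl_insert_fresh d0.items Prod.fst
        (fun pv => pv.2.filter (fun s => !(pvRemoved priority d0).contains (pv.1, s))) PySem.Dict.empty
        (fun a _ => PySem.Dict.contains_empty a.1) (by exact hk)]
  rw [PySem.Dict.items_eq_map_keys d0 hk [], List.map_map]
  rw [show (PySem.Dict.empty : PySem.Dict String (List String)).items = [] from rfl,
      List.nil_append]
  apply List.map_congr_left
  intro k _
  show (k, (pvPairs.foldl (pvResolveStep priority) d0).getD k []) =
    (k, (d0.getD k []).filter (fun s => !(pvRemoved priority d0).contains (k, s)))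
  refine congrArg (Prod.mk k) ?_
  rw [pvFoldA_getD]
  apply List.filter_congr
  intro s hs
  rw [pvKeep_eq priority d0 hk k s hs]
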